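-- pv_equiv track=rewrite | github.com/LakMehta0210/2048-Sci-Comp | 2048-Sci-Comp-main/Main.py | slideDown
-- ===== SOURCE A (Python) =====
-- def slideDown(gameboard):
--     for col_ind in range(len(gameboard[0])):
--         column = [gameboard[k][col_ind] for k in range(len(gameboard))]
--         for i in range(len(column)-1, -1, -1):
--                 if column[i] == None:
--                     for x in range(i,-1, -1):
--                         if column[x] != None:
--                             column[i] = column[x]
--                             column[x] = None
--                             break
--         for index in range(len(column)):
--             gameboard[index][col_ind] = column[index]
--     return gameboard
-- ===== SOURCE B (Python) =====
-- # B: one pass per column — filter the non-None cells and pad with Nones on top.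
-- # Like A, mutates gameboard in place (and returns it).
-- def slideDown(gameboard):
--     n = len(gameboard)
--     for j in range(len(gameboard[0])):
--         vals = [row[j] for row in gameboard if row[j] is not None]
--         newcol = [None] * (n - len(vals)) + vals
--         for i, row in enumerate(gameboard):
--             row[j] = newcol[i]
--     return gameboard
-- ===== Notes on version B (the rewrite author's own statement) =====
-- stated objective: faster
-- what changed: Replaces A's per-column nested backward scans (for each empty cell, rescan downward-from-it for a value to pull) with a single filter-and-pad pass per column: collect the non-None cells in order and prepend the right number of Nones.
-- outside the precondition, e.g. on slideDown([]): A raises IndexError, B raises IndexError; on slideDown([[None, 2], [None]]): A raises IndexError, B raises IndexError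
import Mathlib
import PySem

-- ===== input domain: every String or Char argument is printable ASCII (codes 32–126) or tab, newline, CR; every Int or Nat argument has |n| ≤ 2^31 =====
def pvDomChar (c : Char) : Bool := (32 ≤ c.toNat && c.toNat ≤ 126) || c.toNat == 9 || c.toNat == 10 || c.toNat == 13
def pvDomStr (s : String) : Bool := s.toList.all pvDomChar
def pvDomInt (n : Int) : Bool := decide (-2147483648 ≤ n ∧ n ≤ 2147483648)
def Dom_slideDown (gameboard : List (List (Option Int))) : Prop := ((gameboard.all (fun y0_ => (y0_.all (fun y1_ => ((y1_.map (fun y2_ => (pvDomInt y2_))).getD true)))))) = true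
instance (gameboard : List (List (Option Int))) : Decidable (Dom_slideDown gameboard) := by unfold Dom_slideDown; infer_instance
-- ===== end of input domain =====

-- B is a single filter-and-pad pass per column instead of A's nested index scans.
-- Both Pythons mutate `gameboard` in place identically and return it; the theorems are about the return value.

-- ===== PORT A =====
-- inner loop `for x in range(i,-1,-1): if column[x] != None: … break` — returns the index moved from, if any
def pyFindNonNone (col : List (Option Int)) : Nat → Option Nat
  | 0 => if (col.getD 0 none).isSome then some 0 else none
  | x + 1 => if (col.getD (x + 1) none).isSome then some (x + 1) else pyFindNonNone col x

-- body of `for i in …: if column[i] == None: …`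
def stepA (col : List (Option Int)) (i : Nat) : List (Option Int) :=
  if col.getD i none = none then
    match pyFindNonNone col i with
    | some x => (col.set i (col.getD x none)).set x none
    | none => col
  else col

-- `for i in range(len(column)-1, -1, -1)` : process i, i-1, …, 0
def loopA (col : List (Option Int)) : Nat → List (Option Int)
  | 0 => stepA col 0
  | i + 1 => loopA (stepA col (i + 1)) i

def compactA (col : List (Option Int)) : List (Option Int) :=
  match col.length with
  | 0 => col
  | m + 1 => loopA col m

def slideDown (gameboard : List (List (Option Int))) : List (List (Option Int)) :=
  (List.range (gameboard.headD []).length).foldl (fun g j =>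
    let column := (List.range g.length).map (fun k => (g.getD k []).getD j none)
    let column := compactA column
    (List.range column.length).foldl
      (fun g idx => g.set idx ((g.getD idx []).set j (column.getD idx none))) g) gameboard

-- ===== PORT B =====
def slideDown_alt (gameboard : List (List (Option Int))) : List (List (Option Int)) :=
  let n := gameboard.length
  (List.range (gameboard.headD []).length).foldl (fun g j =>
    let vals := (g.map (fun row => row.getD j none)).filter (fun o => o.isSome)
    let newcol := List.replicate (n - vals.length) none ++ vals
    g.mapIdx (fun i row => row.set j (newcol.getD i none))) gameboard

-- ===== PRECONDITION & SPEC =====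
-- Pre_ excludes exactly the inputs where Python A raises IndexError: the empty board
-- (gameboard[0]) and boards where some row is shorter than the first row (gameboard[k][col_ind]).
def Pre_slideDown (gameboard : List (List (Option Int))) : Prop :=
  gameboard ≠ [] ∧ ∀ row ∈ gameboard, (gameboard.headD []).length ≤ row.length
instance (gameboard : List (List (Option Int))) : Decidable (Pre_slideDown gameboard) := by unfold Pre_slideDown; infer_instance

def pvWitness_slideDown : List (List (Option Int)) :=
  [[some 2, none], [none, some 2], [some 2, some 4]]

def Spec_slideDown (gameboard : List (List (Option Int))) (out : List (List (Option Int))) : Prop := out = slideDown_alt gameboard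
instance (gameboard : List (List (Option Int))) (out : List (List (Option Int))) : Decidable (Spec_slideDown gameboard out) := by unfold Spec_slideDown; infer_instance

-- ===== CLAIM (what is proved, stated in full; the proofs are below) =====
def Claim_equal_slideDown : Prop := ∀ (gameboard : List (List (Option Int))), Dom_slideDown gameboard → Pre_slideDown gameboard → Spec_slideDown gameboard (slideDown gameboard)

-- ===== LEMMAS AND PROOFS =====

def somes (c : List (Option Int)) : List (Option Int) := c.filter (fun o => o.isSome)

def gravity (c : List (Option Int)) : List (Option Int) :=
  List.replicate (c.length - (somes c).length) none ++ somes c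

lemma getD_append_lt (ys : List (Option Int)) (a d : Option Int) {x : Nat} (h : x < ys.length) :
    (ys ++ [a]).getD x d = ys.getD x d := List.getD_append _ _ _ _ h

lemma set_append_lt (ys : List (Option Int)) (a b : Option Int) {x : Nat} (h : x < ys.length) :
    (ys ++ [a]).set x b = ys.set x b ++ [a] := by
  rw [List.set_append]; simp [h]

lemma find_append (ys : List (Option Int)) (a : Option Int) :
    ∀ x, x < ys.length → pyFindNonNone (ys ++ [a]) x = pyFindNonNone ys x := by
  intro x
  induction x with
  | zero => intro h; simp only [pyFindNonNone]; rw [getD_append_lt _ _ _ h]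
  | succ k ih =>
    intro h
    simp only [pyFindNonNone]
    rw [getD_append_lt _ _ _ h, ih (Nat.lt_of_succ_lt h)]

lemma find_le (c : List (Option Int)) : ∀ x j, pyFindNonNone c x = some j → j ≤ x := by
  intro x
  induction x with
  | zero =>
    intro j h; simp only [pyFindNonNone] at h
    split_ifs at h
    injection h with h; omega
  | succ k ih =>
    intro j h
    simp only [pyFindNonNone] at h
    split_ifs at h
    · injection h with h; omega
    · exact Nat.le_succ_of_le (ih j h)

lemma find_isSome (c : List (Option Int)) : ∀ x j, pyFindNonNone c x = some j → (c.getD j none).isSome := by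
  intro x
  induction x with
  | zero =>
    intro j h; simp only [pyFindNonNone] at h
    split_ifs at h with hh
    injection h with h; subst h; exact hh
  | succ k ih =>
    intro j h
    simp only [pyFindNonNone] at h
    split_ifs at h with hh
    · injection h with h; subst h; exact hh
    · exact ih j h

lemma find_max (c : List (Option Int)) : ∀ x j, pyFindNonNone c x = some j →
    ∀ k, j < k → k ≤ x → c.getD k none = none := by
  intro x
  induction x with
  | zero => intro j h k hk hk'; have := find_le c 0 j h; omega
  | succ k ih =>
    intro j h m hm hm'
    simp only [pyFindNonNone] at h
    split_ifs at h with hh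
    · injection h with h; omega
    · rcases Nat.lt_or_ge m (k + 1) with hlt | hge
      · exact ih j h m hm (Nat.lt_succ_iff.mp hlt)
      · have : m = k + 1 := le_antisymm hm' hge
        subst this
        exact Option.not_isSome_iff_eq_none.mp hh

lemma find_none (c : List (Option Int)) : ∀ x, pyFindNonNone c x = none →
    ∀ k, k ≤ x → c.getD k none = none := by
  intro x
  induction x with
  | zero =>
    intro h k hk
    interval_cases k
    simp only [pyFindNonNone] at h
    split_ifs at h with hh
    exact Option.not_isSome_iff_eq_none.mp hh
  | succ n ih =>
    intro h k hk
    simp only [pyFindNonNone] at h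
    split_ifs at h with hh
    rcases Nat.lt_or_ge k (n + 1) with hlt | hge
    · exact ih h k (Nat.lt_succ_iff.mp hlt)
    · have : k = n + 1 := le_antisymm hk hge
      subst this
      exact Option.not_isSome_iff_eq_none.mp hh

lemma find_allnone (c : List (Option Int)) (hc : ∀ k, c.getD k none = none) :
    ∀ x, pyFindNonNone c x = none := by
  intro x
  induction x with
  | zero => simp only [pyFindNonNone, hc 0]; simp
  | succ n ih => simp only [pyFindNonNone, hc (n + 1), ih]; simp

lemma loopA_allnone (c : List (Option Int)) (hc : ∀ k, c.getD k none = none) :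
    ∀ i, loopA c i = c := by
  have hstep : ∀ i, stepA c i = c := by
    intro i; simp [stepA, find_allnone c hc]
  intro i
  induction i with
  | zero => simp [loopA, hstep]
  | succ n ih => simp [loopA, hstep, ih]

lemma stepA_length (c : List (Option Int)) (i : Nat) : (stepA c i).length = c.length := by
  rw [stepA]
  split_ifs
  · cases pyFindNonNone c i <;> simp
  · rfl

lemma stepA_append (ys : List (Option Int)) (a : Option Int) {i : Nat} (h : i < ys.length) :
    stepA (ys ++ [a]) i = stepA ys i ++ [a] := by
  simp only [stepA, getD_append_lt _ _ _ h, find_append ys a i h]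
  split_ifs with h1
  · cases hf : pyFindNonNone ys i with
    | none => rfl
    | some x =>
      have hx : x < ys.length := lt_of_le_of_lt (find_le ys i x hf) h
      show ((ys ++ [a]).set i ((ys ++ [a]).getD x none)).set x none
          = (ys.set i (ys.getD x none)).set x none ++ [a]
      rw [getD_append_lt _ _ _ hx, set_append_lt _ _ _ h,
        set_append_lt _ _ _ (by simpa using hx)]
  · rfl

lemma loopA_append (ys : List (Option Int)) (a : Option Int) :
    ∀ i, i < ys.length → loopA (ys ++ [a]) i = loopA ys i ++ [a] := by
  intro i
  induction i generalizing ys with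
  | zero => intro h; simp [loopA, stepA_append ys a h]
  | succ n ih =>
    intro h
    simp only [loopA, stepA_append ys a h]
    exact ih _ (by rw [stepA_length]; omega)

lemma allnone_eq_replicate (c : List (Option Int)) (hc : ∀ k, c.getD k none = none) :
    c = List.replicate c.length none := by
  apply List.ext_getElem (by simp)
  intro k h1 h2
  have := hc k
  rw [List.getD_eq_getElem _ _ h1] at this
  simp [this]

lemma somes_append_some (ys : List (Option Int)) (v : Int) :
    somes (ys ++ [some v]) = somes ys ++ [some v] := by simp [somes]

lemma gravity_append_some (ys : List (Option Int)) (v : Int) :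
    gravity (ys ++ [some v]) = gravity ys ++ [some v] := by
  simp only [gravity, somes_append_some]
  have h : (somes ys).length ≤ ys.length := List.length_filter_le _ _
  simp only [List.length_append, List.length_cons, List.length_nil]
  rw [show ys.length + 1 - ((somes ys).length + 1) = ys.length - (somes ys).length by omega]
  simp [List.append_assoc]

lemma getD_concat_self (ys : List (Option Int)) (a : Option Int) :
    (ys ++ [a]).getD ys.length none = a := by
  rw [List.getD_eq_getElem _ _ (by simp)]
  simp

lemma somes_set_none (ys : List (Option Int)) {x : Nat} {w : Int}
    (hx : x < ys.length) (hv : ys.getD x none = some w)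
    (hmax : ∀ k, x < k → k < ys.length → ys.getD k none = none) :
    somes ys = somes (ys.set x none) ++ [some w] := by
  have hxe : ys[x] = some w := by rw [← List.getD_eq_getElem ys none hx]; exact hv
  have hdropnone : (ys.drop (x + 1)).filter (fun o => o.isSome) = [] := by
    rw [List.filter_eq_nil_iff]
    intro b hb
    obtain ⟨j, hj, rfl⟩ := List.mem_iff_getElem.mp hb
    have hlt : x + 1 + j < ys.length := by
      have := hj; simp [List.length_drop] at this; omega
    have : (ys.drop (x + 1))[j] = ys[x + 1 + j] := by
      rw [List.getElem_drop]
    rw [this]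
    have := hmax (x + 1 + j) (by omega) hlt
    rw [List.getD_eq_getElem _ _ hlt] at this
    simp [this]
  have hsplit : ys = ys.take x ++ ys[x] :: ys.drop (x + 1) := by
    conv_lhs => rw [← List.take_append_drop x ys]
    rw [List.getElem_cons_drop hx]
  have hset : ys.set x none = ys.take x ++ none :: ys.drop (x + 1) := by
    rw [List.set_eq_take_append_cons_drop]
    simp [hx]
  calc somes ys = somes (ys.take x ++ ys[x] :: ys.drop (x + 1)) := by rw [← hsplit]
    _ = somes (ys.take x) ++ [some w] := by
        simp [somes, List.filter_append, hxe, hdropnone]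
    _ = somes (ys.set x none) ++ [some w] := by
        rw [hset]; simp [somes, List.filter_append, hdropnone]

lemma gravity_move (ys : List (Option Int)) {x : Nat} {w : Int}
    (hx : x < ys.length) (hv : ys.getD x none = some w)
    (hmax : ∀ k, x < k → k < ys.length → ys.getD k none = none) :
    gravity (ys.set x none) ++ [some w] = gravity (ys ++ [none]) := by
  have hsome := somes_set_none ys hx hv hmax
  have h1 : somes (ys ++ [none]) = somes ys := by simp [somes]
  have hlen : (somes ys).length = (somes (ys.set x none)).length + 1 := by
    rw [hsome]; simp
  have hle : (somes (ys.set x none)).length ≤ ys.length := by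
    have := List.length_filter_le (fun o => o.isSome) (ys.set x none)
    simpa [somes] using this
  simp only [gravity, h1, hsome, List.length_set, List.length_append,
    List.length_cons, List.length_nil]
  rw [show ys.length + 1 - ((somes (ys.set x none)).length + 1)
      = ys.length - (somes (ys.set x none)).length by omega]
  simp [List.append_assoc]

-- the key per-column lemma: A's gravity loop = filter-and-pad
lemma compactA_eq_gravity : ∀ c : List (Option Int), compactA c = gravity c := by
  intro c
  induction hn : c.length using Nat.strong_induction_on generalizing c with
  | _ n ih =>
  rcases List.eq_nil_or_concat c with rfl | ⟨ys, a, rfl⟩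
  · simp [compactA, gravity, somes]
  · rw [List.concat_eq_append] at *
    have hlen : (ys ++ [a]).length = ys.length + 1 := by simp
    have hcompact : compactA (ys ++ [a]) = loopA (ys ++ [a]) ys.length := by
      simp [compactA, hlen]
    have hys_lt : ys.length < n := by omega
    cases a with
    | some v =>
      have hstep : stepA (ys ++ [some v]) ys.length = ys ++ [some v] := by
        rw [stepA, getD_concat_self]
        simp
      rw [hcompact]
      cases hys : ys.length with
      | zero =>
        have : ys = [] := List.eq_nil_of_length_eq_zero hys
        subst this
        simp only [List.length_nil] at hstep
        rw [loopA, hstep]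
        simp [gravity, somes]
      | succ k =>
        have hstep' : stepA (ys ++ [some v]) (k + 1) = ys ++ [some v] := hys ▸ hstep
        rw [loopA, hstep', loopA_append ys (some v) k (by omega),
          ← show compactA ys = loopA ys k by simp [compactA, hys]]
        rw [ih ys.length hys_lt ys rfl, gravity_append_some]
    | none =>
      have hget : (ys ++ [none]).getD ys.length none = none := getD_concat_self ys none
      cases hf : pyFindNonNone (ys ++ [none]) ys.length with
      | none =>
        have hall : ∀ k, (ys ++ [none]).getD k none = none := by
          intro k
          rcases Nat.lt_or_ge k (ys.length + 1) with hlt | hge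
          · exact find_none _ _ hf k (by omega)
          · exact List.getD_eq_default _ _ (by simpa [hlen] using hge)
        rw [hcompact, loopA_allnone _ hall, allnone_eq_replicate _ hall]
        simp [gravity, somes]
      | some x =>
        have hx_le := find_le _ _ _ hf
        have hx_some := find_isSome _ _ _ hf
        have hx_max := find_max _ _ _ hf
        have hx : x < ys.length := by
          rcases Nat.lt_or_ge x ys.length with h | h
          · exact h
          · exfalso
            have : x = ys.length := by omega
            subst this
            rw [hget] at hx_some
            simp at hx_some
        obtain ⟨w, hw⟩ : ∃ w, ys.getD x none = some w := by
          rw [getD_append_lt ys none none hx] at hx_some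
          cases hwc : ys.getD x none with
          | none => rw [hwc] at hx_some; simp at hx_some
          | some w => exact ⟨w, rfl⟩
        have hmax' : ∀ k, x < k → k < ys.length → ys.getD k none = none := by
          intro k h1 h2
          have := hx_max k h1 (by omega)
          rwa [getD_append_lt ys none none h2] at this
        have hstep : stepA (ys ++ [none]) ys.length = ys.set x none ++ [some w] := by
          have h1 : stepA (ys ++ [none]) ys.length
              = ((ys ++ [none]).set ys.length ((ys ++ [none]).getD x none)).set x none := by
            rw [stepA, hget, if_pos rfl, hf]
          have h2 : (ys ++ [none]).set ys.length (some w) = ys ++ [some w] := by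
            rw [List.set_append]
            simp
          rw [h1, getD_append_lt ys none none hx, hw, h2, set_append_lt _ _ _ hx]
        obtain ⟨k, hk⟩ : ∃ k, ys.length = k + 1 := ⟨ys.length - 1, by omega⟩
        have hstep' : stepA (ys ++ [none]) (k + 1) = ys.set x none ++ [some w] := hk ▸ hstep
        rw [hcompact, hk, loopA, hstep',
          loopA_append _ (some w) k (by rw [List.length_set]; omega),
          ← show compactA (ys.set x none) = loopA (ys.set x none) k by
            simp [compactA, List.length_set, hk]]
        rw [ih (ys.set x none).length (by rw [List.length_set]; omega) _ rfl]
        exact gravity_move ys hx hw hmax'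

lemma map_range_getD (g : List (List (Option Int))) :
    (List.range g.length).map (fun k => g.getD k []) = g := by
  induction g using List.reverseRecOn with
  | nil => simp
  | append_singleton ys a ih =>
    have hlen : (ys ++ [a]).length = ys.length + 1 := by simp
    rw [hlen, List.range_succ, List.map_append, List.map_cons, List.map_nil,
      List.map_congr_left (fun k hk => List.getD_append _ _ _ _ (List.mem_range.mp hk)), ih]
    have hlast : (ys ++ [a]).getD ys.length [] = a := by
      rw [List.getD_eq_getElem _ _ (by simp)]
      simp
    rw [hlast]

lemma foldl_set_prefix (F : Nat → List (Option Int) → List (Option Int))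
    (g : List (List (Option Int))) :
    ∀ m, m ≤ g.length →
      (List.range m).foldl (fun h idx => h.set idx (F idx (h.getD idx []))) g
        = (g.take m).mapIdx F ++ g.drop m := by
  intro m
  induction m with
  | zero => intro _; simp
  | succ m ihm =>
    intro hm
    have hmlt : m < g.length := by omega
    rw [List.range_succ, List.foldl_append, ihm (by omega)]
    simp only [List.foldl_cons, List.foldl_nil]
    have hlenmi : ((g.take m).mapIdx F).length = m := by
      simp [List.length_take, Nat.min_eq_left (le_of_lt hmlt)]
    have hgetD : ((g.take m).mapIdx F ++ g.drop m).getD m [] = g[m] := by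
      rw [List.getD_append_right _ _ _ _ (by omega), hlenmi, Nat.sub_self,
        List.getD_eq_getElem _ _ (by simp; omega)]
      simp
    have hdrop : g.drop m = g[m] :: g.drop (m + 1) := (List.getElem_cons_drop hmlt).symm
    rw [hgetD, List.set_append]
    simp only [hlenmi, lt_irrefl, Nat.sub_self]
    rw [hdrop, List.set_cons_zero]
    have htake : g.take (m + 1) = g.take m ++ [g[m]] := by
      rw [← List.take_concat_get hmlt, List.concat_eq_append]
    rw [htake, List.mapIdx_append]
    simp [List.length_take, Nat.min_eq_left (le_of_lt hmlt)]

lemma foldl_set_eq_mapIdx (F : Nat → List (Option Int) → List (Option Int))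
    (g : List (List (Option Int))) :
    (List.range g.length).foldl (fun h idx => h.set idx (F idx (h.getD idx []))) g
      = g.mapIdx F := by
  rw [foldl_set_prefix F g g.length le_rfl]
  simp

lemma gravity_length (c : List (Option Int)) : (gravity c).length = c.length := by
  have : (somes c).length ≤ c.length := List.length_filter_le _ _
  simp only [gravity, List.length_append, List.length_replicate]
  omega

lemma extract_eq_map (g : List (List (Option Int))) (j : Nat) :
    (List.range g.length).map (fun k => (g.getD k []).getD j none)
      = g.map (fun row => row.getD j none) := by
  rw [show (fun k => (g.getD k []).getD j none)
      = (fun row => row.getD j none) ∘ (fun k => g.getD k []) from rfl,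
    ← List.map_map, map_range_getD]

lemma step_eq (n : Nat) (g : List (List (Option Int))) (j : Nat) (hg : g.length = n) :
    (let column := (List.range g.length).map (fun k => (g.getD k []).getD j none)
     let column := compactA column
     (List.range column.length).foldl
       (fun g idx => g.set idx ((g.getD idx []).set j (column.getD idx none))) g)
    = (let vals := (g.map (fun row => row.getD j none)).filter (fun o => o.isSome)
       let newcol := List.replicate (n - vals.length) none ++ vals
       g.mapIdx (fun i row => row.set j (newcol.getD i none))) := by
  simp only [extract_eq_map, compactA_eq_gravity]
  have hcol : (g.map (fun row => row.getD j none)).length = g.length := by simp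
  have hnc : List.replicate (n - ((g.map (fun row => row.getD j none)).filter (fun o => o.isSome)).length) none
      ++ (g.map (fun row => row.getD j none)).filter (fun o => o.isSome)
      = gravity (g.map (fun row => row.getD j none)) := by
    simp [gravity, somes, hg]
  rw [hnc, gravity_length, hcol]
  exact foldl_set_eq_mapIdx
    (fun idx row => row.set j ((gravity (g.map (fun row => row.getD j none))).getD idx none)) g

lemma foldl_congr_inv {β : Type} (P : β → Prop) (l : List Nat) (fA fB : β → Nat → β)
    (h : ∀ g j, P g → fA g j = fB g j ∧ P (fA g j)) :
    ∀ g, P g → l.foldl fA g = l.foldl fB g := by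
  induction l with
  | nil => intro g _; rfl
  | cons j t ih =>
    intro g hg
    obtain ⟨heq, hp⟩ := h g j hg
    simp only [List.foldl_cons, heq]
    exact ih (fB g j) (heq ▸ hp)

theorem slideDown_spec : Claim_equal_slideDown := by
  intro gb _ _
  show slideDown gb = slideDown_alt gb
  rw [slideDown, slideDown_alt]
  exact foldl_congr_inv (fun g => g.length = gb.length) _ _ _
    (fun g j hg => ⟨step_eq gb.length g j hg, by
      rw [step_eq gb.length g j hg]; simpa using hg⟩) gb rfl
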